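-- pv_equiv track=rewrite | github.com/wyk18703232953/myResearch | codeComplex/data copy/filteredData/python/cubic/python_cubic_0118.py | solve_single_case
-- ===== SOURCE A (Python) =====
-- def solve_single_case(s, t):
--     ok = False
--     for i in range(len(t)):
--         t1 = list(t[:i]) + ["#"]
--         t2 = list(t[i:]) + ["#"]
--         dp = [[-1] * (len(t) + 1) for _ in range(len(s) + 1)]
--         dp[0][0] = 0
--         for j, ch in enumerate(s):
--             for k in range(len(t1)):
--                 if dp[j][k] == -1:
--                     continue
--                 if dp[j+1][k] < dp[j][k]:
--                     dp[j+1][k] = dp[j][k]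
--                 if ch == t1[k]:
--                     if dp[j+1][k+1] < dp[j][k]:
--                         dp[j+1][k+1] = dp[j][k]
--                 back_index = dp[j][k]
--                 if back_index < len(t2) and ch == t2[back_index]:
--                     if dp[j+1][k] < dp[j][k] + 1:
--                         dp[j+1][k] = dp[j][k] + 1
--         for k in range(len(t) + 1):
--             if dp[len(s)][k] + k >= len(t):
--                 ok = True
--                 break
--         if ok:
--             break
--     return "YES" if ok else "NO"
-- ===== SOURCE B (Python) =====
-- def solve_single_case(s, t):
--     # Classic minimal-prefix DP: for each split point i, decide whether t[:i] and
--     # t[i:] can be embedded as disjoint subsequences of s.  row[b] is the length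
--     # of the shortest prefix of s that disjointly embeds t1[:a] and t2[:b]
--     # (big = len(s)+1 marks "impossible"); each cell extends a smaller state by
--     # the earliest usable occurrence of the next needed character.
--     n, m = len(s), len(t)
--     big = n + 1
--
--     def step(pref, ch):
--         if pref > n:
--             return big
--         j = s.find(ch, pref)
--         return j + 1 if j != -1 else big
--
--     for i in range(m):
--         t1, t2 = t[:i], t[i:]
--         row = [0]
--         last = 0
--         for ch in t2:
--             last = step(last, ch)
--             row.append(last)
--         for a in range(1, i + 1):
--             c = t1[a - 1]
--             last = step(row[0], c)
--             new = [last]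
--             for b in range(1, len(t2) + 1):
--                 last = min(step(row[b], c), step(last, t2[b - 1]))
--                 new.append(last)
--             row = new
--         if row[len(t2)] <= n:
--             return "YES"
--     return "NO"
-- ===== Notes on version B (the rewrite author's own statement) =====
-- stated objective: alternative
-- what changed: Replaces A's per-split forward max-matched-count DP over (prefix of s, t1-position) with the classic minimal-prefix DP over (t1-position, t2-position) whose cell is the shortest prefix of s disjointly embedding both pieces, extended via earliest next occurrence (s.find) and accepted on full embedding; Pre_ excludes s containing '#', which collides with A's internal sentinel and makes A's answer there an accident of the sentinel encoding.
-- outside the precondition, e.g. on solve_single_case('#', 'a'): A returns 'YES', B returns 'NO'; on solve_single_case('#x', 'ab'): A returns 'NO', B returns 'NO'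
import Mathlib
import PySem

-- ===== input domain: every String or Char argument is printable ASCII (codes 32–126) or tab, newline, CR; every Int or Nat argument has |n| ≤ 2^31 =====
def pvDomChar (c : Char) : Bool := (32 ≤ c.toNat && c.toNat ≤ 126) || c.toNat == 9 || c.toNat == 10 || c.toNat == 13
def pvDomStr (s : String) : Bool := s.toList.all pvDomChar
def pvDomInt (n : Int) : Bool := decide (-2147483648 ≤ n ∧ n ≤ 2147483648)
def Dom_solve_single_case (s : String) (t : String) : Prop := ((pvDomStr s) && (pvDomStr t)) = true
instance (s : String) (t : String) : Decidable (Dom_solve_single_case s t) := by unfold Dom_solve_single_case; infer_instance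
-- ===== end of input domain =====

-- B replaces A's per-split max-count DP over s with the classic minimal-prefix
-- disjoint-embedding DP over positions of the two halves (objective: alternative);
-- Pre_ excludes s containing '#', A's internal sentinel character.

-- ===== PORT A =====
-- dp[j][k] read / write on the 2-D Python list (indices are loop counters, always in range)
def pvA_get (dp : List (List Int)) (j k : Nat) : Int := (dp.getD j []).getD k (-1)

def pvA_set (dp : List (List Int)) (j k : Nat) (v : Int) : List (List Int) :=
  dp.set j ((dp.getD j []).set k v)

-- the three guarded writes of A's inner `for k in range(len(t1))` body, in statement order
def pvA_skip (j k : Nat) (dp : List (List Int)) : List (List Int) :=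
  if pvA_get dp (j+1) k < pvA_get dp j k then pvA_set dp (j+1) k (pvA_get dp j k) else dp

def pvA_adv1 (t1 : List Char) (j k : Nat) (ch : Char) (dp : List (List Int)) : List (List Int) :=
  if ch = t1.getD k ' ' then
    (if pvA_get dp (j+1) (k+1) < pvA_get dp j k then pvA_set dp (j+1) (k+1) (pvA_get dp j k) else dp)
  else dp

def pvA_adv2 (t2 : List Char) (j k : Nat) (ch : Char) (dp : List (List Int)) : List (List Int) :=
  let bi := pvA_get dp j k
  if bi < (t2.length : Int) ∧ ch = t2.getD bi.toNat ' ' then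
    (if pvA_get dp (j+1) k < pvA_get dp j k + 1 then pvA_set dp (j+1) k (pvA_get dp j k + 1) else dp)
  else dp

def pvA_body (t1 t2 : List Char) (j : Nat) (ch : Char) (dp : List (List Int)) (k : Nat) :
    List (List Int) :=
  if pvA_get dp j k = -1 then dp
  else pvA_adv2 t2 j k ch (pvA_adv1 t1 j k ch (pvA_skip j k dp))

-- A's `for j, ch in enumerate(s)` loop filling the table
def pvA_dp (t1 t2 sl : List Char) (dp0 : List (List Int)) : List (List Int) :=
  (sl.foldl
    (fun (st : Nat × List (List Int)) ch =>
      (st.1 + 1, (List.range t1.length).foldl (pvA_body t1 t2 st.1 ch) st.2))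
    (0, dp0)).2

-- A's body for one split point i, ending with the `for k in range(len(t)+1)` check
def pvA_split (sl tl : List Char) (i : Nat) : Bool :=
  let t1 := tl.take i ++ ['#']
  let t2 := tl.drop i ++ ['#']
  let dp0 := pvA_set (List.replicate (sl.length + 1) (List.replicate (tl.length + 1) (-1))) 0 0 0
  let dp := pvA_dp t1 t2 sl dp0
  (List.range (tl.length + 1)).any (fun k => decide ((tl.length : Int) ≤ pvA_get dp sl.length k + k))

def solve_single_case (s : String) (t : String) : String :=
  if (List.range t.toList.length).any (fun i => pvA_split s.toList t.toList i) then "YES" else "NO"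

-- ===== PORT B =====
-- hand port of Source B's `s.find(ch, pref)` for a single character and 0 ≤ pref:
-- first index ≥ j holding c, or -1 (exact on that domain, the only way B calls it)
def pvFindB (sl : List Char) (c : Char) (j : Nat) : Int :=
  if h : j < sl.length then (if sl.getD j ' ' = c then (j : Int) else pvFindB sl c (j+1))
  else -1
termination_by sl.length - j

-- Source B's `step(pref, ch)`
def pvStepB (sl : List Char) (pref : Int) (c : Char) : Int :=
  if (sl.length : Int) < pref then (sl.length : Int) + 1
  else
    let j := pvFindB sl c pref.toNat
    if j ≠ -1 then j + 1 else (sl.length : Int) + 1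

-- Source B's first row (a = 0), tracking `last` alongside the list as Source B does
def pvRow0B (sl t2 : List Char) : List Int :=
  (t2.foldl (fun (st : List Int × Int) ch =>
      let l := pvStepB sl st.2 ch; (st.1 ++ [l], l))
    ([0], 0)).1

-- Source B's `for b in range(1, len(t2)+1)` inner loop building row a from row a-1
def pvRowStepB (sl t2 : List Char) (row : List Int) (c : Char) : List Int :=
  let first := pvStepB sl (row.getD 0 0) c
  ((List.range' 1 t2.length).foldl
    (fun (st : List Int × Int) b =>
      let l := min (pvStepB sl (row.getD b 0) c) (pvStepB sl st.2 (t2.getD (b-1) ' '))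
      (st.1 ++ [l], l))
    ([first], first)).1

def pvSplitB (sl tl : List Char) (i : Nat) : Bool :=
  let t1 := tl.take i
  let t2 := tl.drop i
  let row := t1.foldl (pvRowStepB sl t2) (pvRow0B sl t2)
  decide (row.getD t2.length 0 ≤ (sl.length : Int))

def pvB_iloop (sl tl : List Char) : List Nat → String
  | [] => "NO"
  | i :: is => if pvSplitB sl tl i then "YES" else pvB_iloop sl tl is

def solve_single_case_alt (s : String) (t : String) : String :=
  pvB_iloop s.toList t.toList (List.range t.toList.length)

-- ===== PRECONDITION & SPEC =====
-- Pre_ excludes inputs whose s contains the character '#': it collides with the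
-- sentinel A appends to both halves of t, so A's answer there is an accident of
-- the sentinel encoding (e.g. A("#","a") = "YES" although "a" does not occur).
def Pre_solve_single_case (s : String) (t : String) : Prop := '#' ∉ s.toList
instance (s : String) (t : String) : Decidable (Pre_solve_single_case s t) := by
  unfold Pre_solve_single_case; infer_instance

def pvWitness_solve_single_case : String × String := ("abab", "ab")

def Spec_solve_single_case (s : String) (t : String) (out : String) : Prop := out = solve_single_case_alt s t
instance (s : String) (t : String) (out : String) : Decidable (Spec_solve_single_case s t out) := by unfold Spec_solve_single_case; infer_instance

-- ===== CLAIM (what is proved, stated in full; the proofs are below) =====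
def Claim_equal_solve_single_case : Prop := ∀ (s : String) (t : String), Dom_solve_single_case s t → Pre_solve_single_case s t → Spec_solve_single_case s t (solve_single_case s t)

-- ===== LEMMAS AND PROOFS =====

-- The common ground truth: PvEmb t1 t2 sl a b j holds iff t1[:a] and t2[:b] can be
-- embedded as disjoint subsequences of sl[:j].
inductive PvEmb (t1 t2 sl : List Char) : Nat → Nat → Nat → Prop where
  | base : PvEmb t1 t2 sl 0 0 0
  | skip : ∀ {a b j}, j < sl.length → PvEmb t1 t2 sl a b j → PvEmb t1 t2 sl a b (j+1)
  | one : ∀ {a b j}, j < sl.length → a < t1.length → sl.getD j ' ' = t1.getD a ' ' →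
      PvEmb t1 t2 sl a b j → PvEmb t1 t2 sl (a+1) b (j+1)
  | two : ∀ {a b j}, j < sl.length → b < t2.length → sl.getD j ' ' = t2.getD b ' ' →
      PvEmb t1 t2 sl a b j → PvEmb t1 t2 sl a (b+1) (j+1)

theorem pvEmb_le (t1 t2 sl : List Char) (a b j : Nat) (h : PvEmb t1 t2 sl a b j) :
    j ≤ sl.length := by
  induction h with
  | base => omega
  | skip hj _ _ => omega
  | one hj _ _ _ _ => omega
  | two hj _ _ _ _ => omega

theorem pvEmb_bounds (t1 t2 sl : List Char) (a b j : Nat) (h : PvEmb t1 t2 sl a b j) :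
    a ≤ t1.length ∧ b ≤ t2.length := by
  induction h with
  | base => omega
  | skip _ _ ih => exact ih
  | one _ ha _ _ ih => omega
  | two _ hb _ _ ih => omega

theorem pvEmb_mono (t1 t2 sl : List Char) (a b j j' : Nat) (h : PvEmb t1 t2 sl a b j)
    (h1 : j ≤ j') (h2 : j' ≤ sl.length) : PvEmb t1 t2 sl a b j' := by
  induction j' with
  | zero => have : j = 0 := by omega
            exact this ▸ h
  | succ j'' ih =>
    rcases Nat.lt_or_ge j (j'' + 1) with hlt | hge
    · exact PvEmb.skip (by omega) (ih (by omega) (by omega))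
    · have : j = j'' + 1 := by omega
      exact this ▸ h

-- A-side model (from the previous development): pvRows is A's dp table
def pvSelf (t2 : List Char) (ch : Char) (v : Int) : Int :=
  if v = -1 then -1
  else if v < (t2.length : Int) ∧ ch = t2.getD v.toNat ' ' then v + 1 else v

def pvT1m (t1 : List Char) (ch : Char) (r : Nat → Int) (k : Nat) : Int :=
  if 1 ≤ k ∧ ch = t1.getD (k - 1) ' ' then r (k - 1) else -1

def pvStep (t1 t2 : List Char) (ch : Char) (r : Nat → Int) (k : Nat) : Int :=
  if k < t1.length then max (pvT1m t1 ch r k) (pvSelf t2 ch (r k))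
  else if k = t1.length then pvT1m t1 ch r k
  else -1

def pvRow0 : Nat → Int := fun k => if k = 0 then 0 else -1

def pvRows (t1 t2 sl : List Char) : Nat → Nat → Int
  | 0 => pvRow0
  | j + 1 => pvStep t1 t2 (sl.getD j ' ') (pvRows t1 t2 sl j)

theorem pvT1m_ge (t1 : List Char) (ch : Char) (r : Nat → Int) (hr : ∀ k, -1 ≤ r k) (k : Nat) :
    -1 ≤ pvT1m t1 ch r k := by
  unfold pvT1m; split_ifs
  · exact hr _
  · exact le_refl _

theorem pvRows_ge (t1 t2 sl : List Char) (j k : Nat) : -1 ≤ pvRows t1 t2 sl j k := by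
  induction j generalizing k with
  | zero => show -1 ≤ pvRow0 k; unfold pvRow0; split <;> omega
  | succ j ih =>
    show -1 ≤ pvStep t1 t2 (sl.getD j ' ') (pvRows t1 t2 sl j) k
    unfold pvStep
    split_ifs
    · exact le_trans (pvT1m_ge _ _ _ (fun k' => ih k') k) (le_max_left _ _)
    · exact pvT1m_ge _ _ _ (fun k' => ih k') k
    · exact le_refl _

-- soundness: a nonnegative dp cell is a real embedding
theorem pvRows_sound (t1 t2 sl : List Char) (j : Nat) (hj : j ≤ sl.length) (k : Nat)
    (h : 0 ≤ pvRows t1 t2 sl j k) :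
    PvEmb t1 t2 sl k (pvRows t1 t2 sl j k).toNat j := by
  induction j generalizing k with
  | zero =>
    by_cases hk : k = 0
    · subst hk
      have hv : pvRows t1 t2 sl 0 0 = 0 := by simp [pvRows, pvRow0]
      rw [hv]
      exact PvEmb.base
    · exfalso
      have hv : pvRows t1 t2 sl 0 k = -1 := by simp [pvRows, pvRow0, hk]
      omega
  | succ j ih =>
    have hjn : j < sl.length := by omega
    have hge : ∀ k', -1 ≤ pvRows t1 t2 sl j k' := fun k' => pvRows_ge t1 t2 sl j k'
    -- the two building blocks of pvStep
    have hA : ∀ k', 1 ≤ k' → k' ≤ t1.length →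
        0 ≤ pvT1m t1 (sl.getD j ' ') (pvRows t1 t2 sl j) k' →
        PvEmb t1 t2 sl k' (pvT1m t1 (sl.getD j ' ') (pvRows t1 t2 sl j) k').toNat (j+1) := by
      intro k' hk1 hk2 h0
      obtain ⟨k'', rfl⟩ : ∃ k'', k' = k'' + 1 := ⟨k' - 1, by omega⟩
      unfold pvT1m at h0 ⊢
      simp only [Nat.add_sub_cancel] at h0 ⊢
      by_cases hc : 1 ≤ k'' + 1 ∧ sl.getD j ' ' = t1.getD k'' ' '
      · rw [if_pos hc] at h0 ⊢
        exact PvEmb.one hjn (by omega) hc.2 (ih (by omega) k'' h0)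
      · rw [if_neg hc] at h0
        omega
    have hB : ∀ k', 0 ≤ pvSelf t2 (sl.getD j ' ') (pvRows t1 t2 sl j k') →
        PvEmb t1 t2 sl k' (pvSelf t2 (sl.getD j ' ') (pvRows t1 t2 sl j k')).toNat (j+1) := by
      intro k' h0
      unfold pvSelf at h0 ⊢
      by_cases hv : pvRows t1 t2 sl j k' = -1
      · rw [if_pos hv] at h0
        omega
      · rw [if_neg hv] at h0 ⊢
        have hr0 : 0 ≤ pvRows t1 t2 sl j k' := by have := hge k'; omega
        have hemb := ih (by omega) k' hr0
        by_cases hm : pvRows t1 t2 sl j k' < (t2.length : Int) ∧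
            sl.getD j ' ' = t2.getD (pvRows t1 t2 sl j k').toNat ' '
        · rw [if_pos hm]
          have ht : (pvRows t1 t2 sl j k' + 1).toNat = (pvRows t1 t2 sl j k').toNat + 1 := by
            omega
          rw [ht]
          exact PvEmb.two hjn (by omega) hm.2 hemb
        · rw [if_neg hm]
          exact PvEmb.skip hjn hemb
    show PvEmb t1 t2 sl k (pvStep t1 t2 (sl.getD j ' ') (pvRows t1 t2 sl j) k).toNat (j+1)
    have hstep : 0 ≤ pvStep t1 t2 (sl.getD j ' ') (pvRows t1 t2 sl j) k := h
    unfold pvStep at hstep ⊢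
    by_cases hk1 : k < t1.length
    · rw [if_pos hk1] at hstep ⊢
      rcases le_total (pvT1m t1 (sl.getD j ' ') (pvRows t1 t2 sl j) k)
        (pvSelf t2 (sl.getD j ' ') (pvRows t1 t2 sl j k)) with hle | hle
      · rw [max_eq_right hle] at hstep ⊢
        exact hB k hstep
      · rw [max_eq_left hle] at hstep ⊢
        have hT0 : 0 ≤ pvT1m t1 (sl.getD j ' ') (pvRows t1 t2 sl j) k := hstep
        have hk0 : 1 ≤ k := by
          by_contra hcon
          have : k = 0 := by omega
          subst this
          unfold pvT1m at hT0
          rw [if_neg (by omega)] at hT0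
          omega
        exact hA k hk0 (by omega) hstep
    · rw [if_neg hk1] at hstep ⊢
      by_cases hk2 : k = t1.length
      · rw [if_pos hk2] at hstep ⊢
        have hT0 : 0 ≤ pvT1m t1 (sl.getD j ' ') (pvRows t1 t2 sl j) k := hstep
        have hk0 : 1 ≤ k := by
          by_contra hcon
          have : k = 0 := by omega
          subst this
          unfold pvT1m at hT0
          rw [if_neg (by omega)] at hT0
          omega
        exact hA k hk0 (by omega) hstep
      · rw [if_neg hk2] at hstep
        omega

-- completeness below the sentinel column: dp dominates every embedding
theorem pvRows_complete (t1 t2 sl : List Char) (a b j : Nat) (h : PvEmb t1 t2 sl a b j)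
    (ha : a < t1.length) : (b : Int) ≤ pvRows t1 t2 sl j a := by
  induction h with
  | base =>
    simp [pvRows, pvRow0]
  | skip hj h' ih =>
    rename_i a' b' j'
    have ihv := ih ha
    show (b' : Int) ≤ pvStep t1 t2 (sl.getD j' ' ') (pvRows t1 t2 sl j') a'
    unfold pvStep
    rw [if_pos ha]
    have hr0 : 0 ≤ pvRows t1 t2 sl j' a' := le_trans (Int.natCast_nonneg b') ihv
    have hself : pvRows t1 t2 sl j' a' ≤ pvSelf t2 (sl.getD j' ' ') (pvRows t1 t2 sl j' a') := by
      unfold pvSelf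
      split_ifs <;> omega
    have := le_max_right (pvT1m t1 (sl.getD j' ' ') (pvRows t1 t2 sl j') a')
      (pvSelf t2 (sl.getD j' ' ') (pvRows t1 t2 sl j' a'))
    omega
  | one hj ha' hc h' ih =>
    rename_i a' b' j'
    have ihv := ih ha'
    show (b' : Int) ≤ pvStep t1 t2 (sl.getD j' ' ') (pvRows t1 t2 sl j') (a' + 1)
    unfold pvStep
    rw [if_pos ha]
    have hT : pvT1m t1 (sl.getD j' ' ') (pvRows t1 t2 sl j') (a' + 1) = pvRows t1 t2 sl j' a' := by
      unfold pvT1m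
      rw [if_pos ⟨by omega, by simpa using hc⟩, Nat.add_sub_cancel]
    have := le_max_left (pvT1m t1 (sl.getD j' ' ') (pvRows t1 t2 sl j') (a' + 1))
      (pvSelf t2 (sl.getD j' ' ') (pvRows t1 t2 sl j' (a' + 1)))
    omega
  | two hj hb hc h' ih =>
    rename_i a' b' j'
    have ihv := ih ha
    show ((b' + 1 : Nat) : Int) ≤ pvStep t1 t2 (sl.getD j' ' ') (pvRows t1 t2 sl j') a'
    unfold pvStep
    rw [if_pos ha]
    have hr0 : 0 ≤ pvRows t1 t2 sl j' a' :=
      le_trans (Int.natCast_nonneg b') ihv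
    have hself : (b' : Int) + 1 ≤ pvSelf t2 (sl.getD j' ' ') (pvRows t1 t2 sl j' a') := by
      unfold pvSelf
      rcases eq_or_lt_of_le ihv with heq | hlt
      · rw [if_neg (by omega), if_pos ?side]
        case side =>
          constructor
          · omega
          · have ht : (pvRows t1 t2 sl j' a').toNat = b' := by omega
            rw [ht]
            exact hc
        omega
      · rw [if_neg (by omega)]
        split_ifs <;> omega
    have := le_max_right (pvT1m t1 (sl.getD j' ' ') (pvRows t1 t2 sl j') a')
      (pvSelf t2 (sl.getD j' ' ') (pvRows t1 t2 sl j' a'))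
    push_cast
    omega

-- sentinel bridge: with no '#' in s, the appended sentinels can never be matched
theorem pvEmb_bridge (x y sl : List Char) (hs : '#' ∉ sl) (a b j : Nat) :
    PvEmb (x ++ ['#']) (y ++ ['#']) sl a b j ↔ PvEmb x y sl a b j := by
  have hchar : ∀ j', j' < sl.length → sl.getD j' ' ' ≠ '#' := by
    intro j' hj' hc
    apply hs
    rw [← hc, List.getD_eq_getElem?_getD, List.getElem?_eq_getElem hj']
    exact List.getElem_mem hj'
  have hget1 : ∀ (z : List Char) (a' : Nat), a' < z.length →
      (z ++ ['#']).getD a' ' ' = z.getD a' ' ' := by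
    intro z a' ha'
    simp [List.getD_eq_getElem?_getD, List.getElem?_append_left ha']
  have hsent : ∀ (z : List Char), (z ++ ['#']).getD z.length ' ' = '#' := by
    intro z
    rw [List.getD_eq_getElem?_getD, List.getElem?_concat_length]
    rfl
  constructor
  · intro h
    induction h with
    | base => exact PvEmb.base
    | skip hj hprev ih => exact PvEmb.skip hj ih
    | one hj ha hc hprev ih =>
      rename_i a' b' j'
      have halt : a' < x.length := by
        by_contra hcon
        have he : a' = x.length := by
          simp only [List.length_append, List.length_cons, List.length_nil] at ha
          omega
        rw [he, hsent x] at hc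
        exact hchar j' hj hc
      exact PvEmb.one hj halt (by rw [hget1 x a' halt] at hc; exact hc) ih
    | two hj hb hc hprev ih =>
      rename_i a' b' j'
      have hblt : b' < y.length := by
        by_contra hcon
        have he : b' = y.length := by
          simp only [List.length_append, List.length_cons, List.length_nil] at hb
          omega
        rw [he, hsent y] at hc
        exact hchar j' hj hc
      exact PvEmb.two hj hblt (by rw [hget1 y b' hblt] at hc; exact hc) ih
  · intro h
    induction h with
    | base => exact PvEmb.base
    | skip hj hprev ih => exact PvEmb.skip hj ih
    | one hj ha hc hprev ih =>
      rename_i a' b' j'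
      exact PvEmb.one hj (by simp; omega) (by rw [hget1 x a' ha]; exact hc) ih
    | two hj hb hc hprev ih =>
      rename_i a' b' j'
      exact PvEmb.two hj (by simp; omega) (by rw [hget1 y b' hb]; exact hc) ih

-- B-side value specification: v is the least prefix of sl embedding (a, b), or len+1
def PvMinSpec (t1 t2 sl : List Char) (a b : Nat) (v : Int) : Prop :=
  (0 ≤ v ∧ v ≤ (sl.length : Int) ∧ PvEmb t1 t2 sl a b v.toNat ∧
    ∀ j, PvEmb t1 t2 sl a b j → v ≤ (j : Int)) ∨
  (v = (sl.length : Int) + 1 ∧ ∀ j, ¬ PvEmb t1 t2 sl a b j)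

theorem pvFindB_spec (sl : List Char) (c : Char) (j0 : Nat) :
    (pvFindB sl c j0 = -1 ∧ ∀ p, j0 ≤ p → p < sl.length → sl.getD p ' ' ≠ c) ∨
    (∃ p : Nat, pvFindB sl c j0 = (p : Int) ∧ j0 ≤ p ∧ p < sl.length ∧ sl.getD p ' ' = c ∧
      ∀ q, j0 ≤ q → q < p → sl.getD q ' ' ≠ c) := by
  have key : ∀ d j0, sl.length - j0 = d →
      (pvFindB sl c j0 = -1 ∧ ∀ p, j0 ≤ p → p < sl.length → sl.getD p ' ' ≠ c) ∨
      (∃ p : Nat, pvFindB sl c j0 = (p : Int) ∧ j0 ≤ p ∧ p < sl.length ∧ sl.getD p ' ' = c ∧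
        ∀ q, j0 ≤ q → q < p → sl.getD q ' ' ≠ c) := by
    intro d
    induction d with
    | zero =>
      intro j0 hd
      left
      rw [pvFindB, dif_neg (by omega)]
      exact ⟨rfl, fun p h1 h2 => by omega⟩
    | succ d ih =>
      intro j0 hd
      rw [pvFindB, dif_pos (by omega)]
      by_cases hc : sl.getD j0 ' ' = c
      · right
        exact ⟨j0, by rw [if_pos hc], le_refl _, by omega, hc, fun q h1 h2 => by omega⟩
      · rw [if_neg hc]
        rcases ih (j0 + 1) (by omega) with ⟨he, hall⟩ | ⟨p, he, h1, h2, h3, h4⟩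
        · left
          refine ⟨he, fun p hp1 hp2 => ?_⟩
          rcases Nat.eq_or_lt_of_le hp1 with rfl | hlt
          · exact hc
          · exact hall p hlt hp2
        · right
          refine ⟨p, he, by omega, h2, h3, fun q hq1 hq2 => ?_⟩
          rcases Nat.eq_or_lt_of_le hq1 with rfl | hlt
          · exact hc
          · exact h4 q hlt hq2
  exact key (sl.length - j0) j0 rfl

-- candidate property of one `step` from a min-spec cell
theorem pvCand (t1 t2 sl : List Char) (a' b' : Nat) (v : Int) (c : Char)
    (hv : PvMinSpec t1 t2 sl a' b' v) :
    0 ≤ pvStepB sl v c ∧ pvStepB sl v c ≤ (sl.length : Int) + 1 ∧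
    (pvStepB sl v c ≤ (sl.length : Int) →
      ∃ p : Nat, pvStepB sl v c = (p : Int) + 1 ∧ p < sl.length ∧ sl.getD p ' ' = c ∧
        PvEmb t1 t2 sl a' b' p) ∧
    (∀ p : Nat, p < sl.length → sl.getD p ' ' = c → PvEmb t1 t2 sl a' b' p →
      pvStepB sl v c ≤ (p : Int) + 1) := by
  rcases hv with ⟨h0v, hlev, hemb, hminv⟩ | ⟨hveq, hnone⟩
  · unfold pvStepB
    rw [if_neg (by omega)]
    rcases pvFindB_spec sl c v.toNat with ⟨he, hall⟩ | ⟨p, he, h1, h2, h3, h4⟩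
    · simp only [he]
      rw [if_neg (by simp)]
      refine ⟨by omega, by omega, fun h => absurd h (by omega), ?_⟩
      intro p hp hc hpe
      exfalso
      have hv1 : v ≤ (p : Int) := hminv p hpe
      exact hall p (by omega) hp hc
    · simp only [he]
      rw [if_pos (by omega)]
      refine ⟨by omega, by omega, ?_, ?_⟩
      · intro _
        refine ⟨p, rfl, h2, h3, ?_⟩
        exact pvEmb_mono t1 t2 sl a' b' v.toNat p hemb h1 (by omega)
      · intro q hq hcq hqe
        have hv1 : v ≤ (q : Int) := hminv q hqe
        have : p ≤ q := by
          by_contra hcon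
          exact h4 q (by omega) (by omega) hcq
        omega
  · unfold pvStepB
    rw [if_pos (by omega)]
    refine ⟨by omega, by omega, fun h => absurd h (by omega), ?_⟩
    intro p _ _ hpe
    exact absurd hpe (hnone p)

theorem pvTarget (t1 t2 sl : List Char) (a b : Nat) (w : Int)
    (h0 : 0 ≤ w) (hbig : w ≤ (sl.length : Int) + 1)
    (hfeas : w ≤ (sl.length : Int) → PvEmb t1 t2 sl a b w.toNat)
    (hmin : ∀ j, PvEmb t1 t2 sl a b j → w ≤ (j : Int)) :
    PvMinSpec t1 t2 sl a b w := by
  by_cases hle : w ≤ (sl.length : Int)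
  · exact Or.inl ⟨h0, hle, hfeas hle, hmin⟩
  · refine Or.inr ⟨by omega, fun j hj => ?_⟩
    have := hmin j hj
    have := pvEmb_le t1 t2 sl a b j hj
    omega

theorem pvMinSpec_zero (t1 t2 sl : List Char) : PvMinSpec t1 t2 sl 0 0 0 := by
  left
  refine ⟨le_refl _, by omega, PvEmb.base, fun j _ => by omega⟩

-- the three DP transitions preserve the min-spec
theorem pvMin_row0 (t1 t2 sl : List Char) (b : Nat) (v : Int) (hb : b < t2.length)
    (hv : PvMinSpec t1 t2 sl 0 b v) :
    PvMinSpec t1 t2 sl 0 (b+1) (pvStepB sl v (t2.getD b ' ')) := by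
  obtain ⟨c0, cbig, cfeas, cmin⟩ := pvCand t1 t2 sl 0 b v (t2.getD b ' ') hv
  refine pvTarget t1 t2 sl 0 (b+1) _ c0 cbig ?_ ?_
  · intro h
    obtain ⟨p, hw, hp, hc, hemb⟩ := cfeas h
    have ht : (pvStepB sl v (t2.getD b ' ')).toNat = p + 1 := by omega
    rw [ht]
    exact PvEmb.two hp hb hc hemb
  · intro j
    induction j using Nat.strong_induction_on with
    | _ j ih =>
      intro h
      cases h with
      | skip hj h' =>
        have := ih _ (Nat.lt_succ_self _) h'
        push_cast at *
        omega
      | two hj hb' hc' h' =>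
        have := cmin _ hj hc' h'
        push_cast at *
        omega

theorem pvMin_first (t1 t2 sl : List Char) (a : Nat) (v : Int) (ha : a < t1.length)
    (hv : PvMinSpec t1 t2 sl a 0 v) :
    PvMinSpec t1 t2 sl (a+1) 0 (pvStepB sl v (t1.getD a ' ')) := by
  obtain ⟨c0, cbig, cfeas, cmin⟩ := pvCand t1 t2 sl a 0 v (t1.getD a ' ') hv
  refine pvTarget t1 t2 sl (a+1) 0 _ c0 cbig ?_ ?_
  · intro h
    obtain ⟨p, hw, hp, hc, hemb⟩ := cfeas h
    have ht : (pvStepB sl v (t1.getD a ' ')).toNat = p + 1 := by omega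
    rw [ht]
    exact PvEmb.one hp ha hc hemb
  · intro j
    induction j using Nat.strong_induction_on with
    | _ j ih =>
      intro h
      cases h with
      | skip hj h' =>
        have := ih _ (Nat.lt_succ_self _) h'
        push_cast at *
        omega
      | one hj ha' hc' h' =>
        have := cmin _ hj hc' h'
        push_cast at *
        omega

theorem pvMin_inner (t1 t2 sl : List Char) (a b : Nat) (v1 v2 : Int)
    (ha : a < t1.length) (hb : b < t2.length)
    (h1 : PvMinSpec t1 t2 sl a (b+1) v1) (h2 : PvMinSpec t1 t2 sl (a+1) b v2) :
    PvMinSpec t1 t2 sl (a+1) (b+1)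
      (min (pvStepB sl v1 (t1.getD a ' ')) (pvStepB sl v2 (t2.getD b ' '))) := by
  obtain ⟨c10, c1big, c1feas, c1min⟩ := pvCand t1 t2 sl a (b+1) v1 (t1.getD a ' ') h1
  obtain ⟨c20, c2big, c2feas, c2min⟩ := pvCand t1 t2 sl (a+1) b v2 (t2.getD b ' ') h2
  refine pvTarget t1 t2 sl (a+1) (b+1) _ (le_min c10 c20)
    (le_trans (min_le_left _ _) c1big) ?_ ?_
  · intro h
    rcases le_total (pvStepB sl v1 (t1.getD a ' ')) (pvStepB sl v2 (t2.getD b ' ')) with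
      hle | hle
    · obtain ⟨p, hw, hp, hc, hemb⟩ := c1feas (by omega)
      have ht : (min (pvStepB sl v1 (t1.getD a ' ')) (pvStepB sl v2 (t2.getD b ' '))).toNat
          = p + 1 := by omega
      rw [ht]
      exact PvEmb.one hp ha hc hemb
    · obtain ⟨p, hw, hp, hc, hemb⟩ := c2feas (by omega)
      have ht : (min (pvStepB sl v1 (t1.getD a ' ')) (pvStepB sl v2 (t2.getD b ' '))).toNat
          = p + 1 := by omega
      rw [ht]
      exact PvEmb.two hp hb hc hemb
  · intro j
    induction j using Nat.strong_induction_on with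
    | _ j ih =>
      intro h
      cases h with
      | skip hj h' =>
        have := ih _ (Nat.lt_succ_self _) h'
        push_cast at *
        omega
      | one hj ha' hc' h' =>
        have := c1min _ hj hc' h'
        push_cast at *
        omega
      | two hj hb' hc' h' =>
        have := c2min _ hj hc' h'
        push_cast at *
        omega

-- the computed rows satisfy the min-spec everywhere
def pvRowOK (t1 t2 sl : List Char) (a : Nat) (row : List Int) : Prop :=
  row.length = t2.length + 1 ∧ ∀ b, b ≤ t2.length → PvMinSpec t1 t2 sl a b (row.getD b 0)

-- reading the iterated character of a fold from the drop-suffix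
theorem pv_drop_head (xs : List Char) (j0 : Nat) (ch : Char) (rest : List Char)
    (hdrop : xs.drop j0 = ch :: rest) :
    xs.getD j0 ' ' = ch ∧ xs.drop (j0 + 1) = rest ∧ j0 < xs.length := by
  have h0 : (xs.drop j0)[0]? = some ch := by rw [hdrop]; rfl
  rw [List.getElem?_drop] at h0
  have h1 : (xs.drop j0).drop 1 = rest := by rw [hdrop]; rfl
  rw [List.drop_drop] at h1
  have hlen := congrArg List.length hdrop
  simp only [List.length_drop, List.length_cons] at hlen
  refine ⟨?_, h1, by omega⟩
  rw [List.getD_eq_getElem?_getD]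
  simp only [Nat.add_zero] at h0
  rw [h0]
  rfl

theorem pvRow0B_ok (t1 t2 sl : List Char) : pvRowOK t1 t2 sl 0 (pvRow0B sl t2) := by
  have main : ∀ (y : List Char) (b0 : Nat) (lst : List Int) (last : Int),
      t2.drop b0 = y → b0 ≤ t2.length →
      lst.length = b0 + 1 →
      (∀ b, b ≤ b0 → PvMinSpec t1 t2 sl 0 b (lst.getD b 0)) →
      last = lst.getD b0 0 →
      pvRowOK t1 t2 sl 0
        ((y.foldl (fun (st : List Int × Int) ch =>
            let l := pvStepB sl st.2 ch; (st.1 ++ [l], l)) (lst, last)).1) := by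
    intro y
    induction y with
    | nil =>
      intro b0 lst last hdrop hb0le hlen hspec _
      have hge : t2.length ≤ b0 := List.drop_eq_nil_iff.mp hdrop
      have hb0 : b0 = t2.length := by omega
      simp only [List.foldl_nil]
      exact ⟨by omega, fun b hb => hspec b (by omega)⟩
    | cons ch rest ih =>
      intro b0 lst last hdrop hb0le hlen hspec hlast
      obtain ⟨hch, hrest, hb0⟩ := pv_drop_head t2 b0 ch rest hdrop
      simp only [List.foldl_cons]
      have hstep : PvMinSpec t1 t2 sl 0 (b0 + 1) (pvStepB sl last ch) := by
        rw [hlast, ← hch]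
        exact pvMin_row0 t1 t2 sl b0 _ hb0 (hspec b0 le_rfl)
      have hg : (lst ++ [pvStepB sl last ch]).getD (b0 + 1) 0 = pvStepB sl last ch := by
        have hl : b0 + 1 = lst.length := by omega
        rw [hl]
        simp [List.getD_eq_getElem?_getD]
      refine ih (b0 + 1) _ _ hrest (by omega) (by simp [hlen]) ?_ hg.symm
      intro b hb
      rcases Nat.lt_or_ge b (b0 + 1) with hlt | hge
      · rw [List.getD_append _ _ _ _ (by omega)]
        exact hspec b (by omega)
      · have hbeq : b = b0 + 1 := by omega
        subst hbeq
        rw [hg]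
        exact hstep
  unfold pvRow0B
  refine main t2 0 [0] 0 (by simp) (by omega) (by simp) ?_ (by simp)
  intro b hb
  have hb0 : b = 0 := by omega
  subst hb0
  simpa using pvMinSpec_zero t1 t2 sl

theorem pvRowStepB_ok (t1 t2 sl : List Char) (a : Nat) (row : List Int) (ha : a < t1.length)
    (h : pvRowOK t1 t2 sl a row) :
    pvRowOK t1 t2 sl (a+1) (pvRowStepB sl t2 row (t1.getD a ' ')) := by
  obtain ⟨hrl, hrs⟩ := h
  have hfirst : PvMinSpec t1 t2 sl (a+1) 0 (pvStepB sl (row.getD 0 0) (t1.getD a ' ')) :=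
    pvMin_first t1 t2 sl a _ ha (hrs 0 (by omega))
  have main : ∀ (d b0 : Nat) (lst : List Int) (last : Int),
      b0 + d = t2.length →
      lst.length = b0 + 1 →
      (∀ b, b ≤ b0 → PvMinSpec t1 t2 sl (a+1) b (lst.getD b 0)) →
      last = lst.getD b0 0 →
      pvRowOK t1 t2 sl (a+1)
        (((List.range' (b0+1) d).foldl (fun (st : List Int × Int) b =>
            let l := min (pvStepB sl (row.getD b 0) (t1.getD a ' '))
                        (pvStepB sl st.2 (t2.getD (b-1) ' '))
            (st.1 ++ [l], l)) (lst, last)).1) := by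
    intro d
    induction d with
    | zero =>
      intro b0 lst last hd hlen hspec _
      simp only [List.range'_zero, List.foldl_nil]
      exact ⟨by omega, fun b hb => hspec b (by omega)⟩
    | succ d ihd =>
      intro b0 lst last hd hlen hspec hlast
      rw [List.range'_succ]
      simp only [List.foldl_cons]
      have hb0 : b0 < t2.length := by omega
      have hstep : PvMinSpec t1 t2 sl (a+1) (b0+1)
          (min (pvStepB sl (row.getD (b0+1) 0) (t1.getD a ' '))
               (pvStepB sl last (t2.getD b0 ' '))) := by
        rw [hlast]
        exact pvMin_inner t1 t2 sl a b0 _ _ ha hb0 (hrs (b0+1) (by omega)) (hspec b0 le_rfl)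
      have hred : (b0 + 1) - 1 = b0 := by omega
      rw [hred]
      have hg : (lst ++ [min (pvStepB sl (row.getD (b0+1) 0) (t1.getD a ' '))
            (pvStepB sl last (t2.getD b0 ' '))]).getD (b0 + 1) 0 =
          min (pvStepB sl (row.getD (b0+1) 0) (t1.getD a ' '))
            (pvStepB sl last (t2.getD b0 ' ')) := by
        have hl : b0 + 1 = lst.length := by omega
        rw [hl]
        simp [List.getD_eq_getElem?_getD]
      refine ihd (b0 + 1) _ _ (by omega) (by simp [hlen]) ?_ hg.symm
      intro b hb
      rcases Nat.lt_or_ge b (b0 + 1) with hlt | hge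
      · rw [List.getD_append _ _ _ _ (by omega)]
        exact hspec b (by omega)
      · have hbeq : b = b0 + 1 := by omega
        subst hbeq
        rw [hg]
        exact hstep
  have := main t2.length 0 [pvStepB sl (row.getD 0 0) (t1.getD a ' ')]
    (pvStepB sl (row.getD 0 0) (t1.getD a ' '))
    (by omega) (by simp) (fun b hb => by
      have hb0 : b = 0 := by omega
      subst hb0
      simpa using hfirst) (by simp [List.getD_eq_getElem?_getD])
  unfold pvRowStepB
  simpa using this

theorem pvRowsB_ok (t1 t2 sl : List Char) :
    pvRowOK t1 t2 sl t1.length (t1.foldl (pvRowStepB sl t2) (pvRow0B sl t2)) := by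
  have main : ∀ (y : List Char) (a0 : Nat) (row : List Int),
      t1.drop a0 = y → a0 ≤ t1.length → pvRowOK t1 t2 sl a0 row →
      pvRowOK t1 t2 sl t1.length (y.foldl (pvRowStepB sl t2) row) := by
    intro y
    induction y with
    | nil =>
      intro a0 row hdrop ha0le hok
      have hge : t1.length ≤ a0 := List.drop_eq_nil_iff.mp hdrop
      have hb0 : a0 = t1.length := by omega
      simp only [List.foldl_nil]
      exact hb0 ▸ hok
    | cons ch rest ih =>
      intro a0 row hdrop ha0le hok
      obtain ⟨hch, hrest, ha0⟩ := pv_drop_head t1 a0 ch rest hdrop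
      simp only [List.foldl_cons]
      refine ih (a0 + 1) _ hrest (by omega) ?_
      rw [← hch]
      exact pvRowStepB_ok t1 t2 sl a0 row ha0 hok
  exact main t1 0 _ (by simp) (by omega) (pvRow0B_ok t1 t2 sl)

-- B's per-split verdict is full disjoint embeddability
theorem pvSplitB_iff (sl tl : List Char) (i : Nat) (hi : i < tl.length) :
    pvSplitB sl tl i = true ↔
      PvEmb (tl.take i) (tl.drop i) sl i (tl.length - i) sl.length := by
  have ht1 : (tl.take i).length = i := by simp; omega
  have ht2 : (tl.drop i).length = tl.length - i := by simp
  obtain ⟨hrl, hrs⟩ := pvRowsB_ok (tl.take i) (tl.drop i) sl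
  have hspec := hrs (tl.drop i).length le_rfl
  unfold pvSplitB
  simp only [decide_eq_true_eq]
  rw [ht1, ht2] at hspec
  rw [ht2]
  constructor
  · intro hle
    rcases hspec with ⟨h0, hlen, hemb, _⟩ | ⟨hbig, _⟩
    · exact pvEmb_mono _ _ _ _ _ _ _ hemb (by omega) le_rfl
    · omega
  · intro hemb
    rcases hspec with ⟨h0, hlen, _, _⟩ | ⟨_, hnone⟩
    · exact hlen
    · exact absurd hemb (hnone sl.length)

-- A's per-split verdict is the same (previous development's table lemma + PvEmb)
-- shape of A's table, and get/set algebra (A's table realises pvRows)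
def pvShape (n m : Nat) (dp : List (List Int)) : Prop :=
  dp.length = n + 1 ∧ ∀ j, j ≤ n → (dp.getD j []).length = m + 1

theorem pv_getD_set {α : Type} (l : List α) (i j : Nat) (a : α) (d : α) :
    (l.set i a).getD j d = if i = j ∧ i < l.length then a else l.getD j d := by
  simp only [List.getD_eq_getElem?_getD, List.getElem?_set]
  split
  · split <;> simp_all
  · rename_i h; simp [h]

theorem pvA_set_shape (n m : Nat) (dp : List (List Int)) (j k : Nat) (v : Int)
    (hsh : pvShape n m dp) : pvShape n m (pvA_set dp j k v) := by
  obtain ⟨hlen, hrow⟩ := hsh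
  refine ⟨by simp [pvA_set, hlen], ?_⟩
  intro j' hj'
  unfold pvA_set
  rw [pv_getD_set]
  split_ifs with h
  · obtain ⟨he, _⟩ := h
    rw [List.length_set]
    exact hrow j (he ▸ hj')
  · exact hrow j' hj'

theorem pvA_get_set (n m : Nat) (dp : List (List Int)) (j k : Nat) (v : Int)
    (hsh : pvShape n m dp) (hj : j ≤ n) (hk : k ≤ m) (j' k' : Nat) :
    pvA_get (pvA_set dp j k v) j' k' = if j' = j ∧ k' = k then v else pvA_get dp j' k' := by
  obtain ⟨hlen, hrow⟩ := hsh
  unfold pvA_get pvA_set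
  rw [pv_getD_set]
  by_cases hjj : j = j'
  · subst hjj
    rw [if_pos ⟨rfl, by omega⟩, pv_getD_set]
    have hL : (dp.getD j []).length = m + 1 := hrow j hj
    by_cases hkk : k = k'
    · subst hkk
      rw [if_pos ⟨rfl, by omega⟩, if_pos ⟨rfl, rfl⟩]
    · rw [if_neg (by tauto), if_neg (by tauto)]
  · rw [if_neg (by tauto), if_neg (by tauto)]

theorem pvA_skip_shape (n m : Nat) (dp : List (List Int)) (j k : Nat) (hsh : pvShape n m dp) :
    pvShape n m (pvA_skip j k dp) := by
  unfold pvA_skip; split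
  · exact pvA_set_shape n m dp _ _ _ hsh
  · exact hsh

theorem pvA_adv1_shape (n m : Nat) (t1 : List Char) (dp : List (List Int)) (j k : Nat) (ch : Char)
    (hsh : pvShape n m dp) : pvShape n m (pvA_adv1 t1 j k ch dp) := by
  unfold pvA_adv1; split_ifs
  · exact pvA_set_shape n m dp _ _ _ hsh
  · exact hsh
  · exact hsh

theorem pvA_adv2_shape (n m : Nat) (t2 : List Char) (dp : List (List Int)) (j k : Nat) (ch : Char)
    (hsh : pvShape n m dp) : pvShape n m (pvA_adv2 t2 j k ch dp) := by
  unfold pvA_adv2; dsimp only; split_ifs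
  · exact pvA_set_shape n m dp _ _ _ hsh
  · exact hsh
  · exact hsh

theorem pvA_skip_get (n m : Nat) (dp : List (List Int)) (j k : Nat)
    (hsh : pvShape n m dp) (hj : j + 1 ≤ n) (hk : k ≤ m) (j' k' : Nat) :
    pvA_get (pvA_skip j k dp) j' k' =
      if j' = j + 1 ∧ k' = k then max (pvA_get dp (j+1) k) (pvA_get dp j k)
      else pvA_get dp j' k' := by
  unfold pvA_skip
  by_cases h1 : pvA_get dp (j+1) k < pvA_get dp j k
  · rw [if_pos h1, pvA_get_set n m dp (j+1) k _ hsh hj hk]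
    by_cases h2 : j' = j + 1 ∧ k' = k
    · rw [if_pos h2, if_pos h2]; omega
    · rw [if_neg h2, if_neg h2]
  · rw [if_neg h1]
    by_cases h2 : j' = j + 1 ∧ k' = k
    · rw [if_pos h2]; obtain ⟨e1, e2⟩ := h2; subst e1; subst e2; omega
    · rw [if_neg h2]

theorem pvA_adv1_get (n m : Nat) (t1 : List Char) (dp : List (List Int)) (j k : Nat) (ch : Char)
    (hsh : pvShape n m dp) (hj : j + 1 ≤ n) (hk : k + 1 ≤ m) (j' k' : Nat) :
    pvA_get (pvA_adv1 t1 j k ch dp) j' k' =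
      if j' = j + 1 ∧ k' = k + 1 ∧ ch = t1.getD k ' ' then
        max (pvA_get dp (j+1) (k+1)) (pvA_get dp j k)
      else pvA_get dp j' k' := by
  unfold pvA_adv1
  by_cases h1 : ch = t1.getD k ' '
  · rw [if_pos h1]
    by_cases h2 : pvA_get dp (j+1) (k+1) < pvA_get dp j k
    · rw [if_pos h2, pvA_get_set n m dp (j+1) (k+1) _ hsh hj hk]
      by_cases h3 : j' = j + 1 ∧ k' = k + 1
      · rw [if_pos h3, if_pos ⟨h3.1, h3.2, h1⟩]; omega
      · rw [if_neg h3, if_neg (by tauto)]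
    · rw [if_neg h2]
      by_cases h3 : j' = j + 1 ∧ k' = k + 1
      · rw [if_pos ⟨h3.1, h3.2, h1⟩]; obtain ⟨e1, e2⟩ := h3; subst e1; subst e2; omega
      · rw [if_neg (by tauto)]
  · rw [if_neg h1, if_neg (by tauto)]

theorem pvA_adv2_get (n m : Nat) (t2 : List Char) (dp : List (List Int)) (j k : Nat) (ch : Char)
    (hsh : pvShape n m dp) (hj : j + 1 ≤ n) (hk : k ≤ m) (j' k' : Nat) :
    pvA_get (pvA_adv2 t2 j k ch dp) j' k' =
      if j' = j + 1 ∧ k' = k ∧ pvA_get dp j k < (t2.length : Int) ∧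
          ch = t2.getD (pvA_get dp j k).toNat ' ' then
        max (pvA_get dp (j+1) k) (pvA_get dp j k + 1)
      else pvA_get dp j' k' := by
  unfold pvA_adv2
  dsimp only
  by_cases h1 : pvA_get dp j k < (t2.length : Int) ∧ ch = t2.getD (pvA_get dp j k).toNat ' '
  · rw [if_pos h1]
    by_cases h2 : pvA_get dp (j+1) k < pvA_get dp j k + 1
    · rw [if_pos h2, pvA_get_set n m dp (j+1) k _ hsh hj hk]
      by_cases h3 : j' = j + 1 ∧ k' = k
      · rw [if_pos h3, if_pos ⟨h3.1, h3.2, h1.1, h1.2⟩]; omega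
      · rw [if_neg h3, if_neg (by tauto)]
    · rw [if_neg h2]
      by_cases h3 : j' = j + 1 ∧ k' = k
      · rw [if_pos ⟨h3.1, h3.2, h1.1, h1.2⟩]; obtain ⟨e1, e2⟩ := h3; subst e1; subst e2; omega
      · rw [if_neg (by tauto)]
  · rw [if_neg h1, if_neg (by tauto)]

-- A's inner loop: one row update realises pvStep
theorem pvA_row_eq (t1 t2 sl : List Char) (n m : Nat) (hn : n = sl.length)
    (_h1 : 0 < t1.length) (hm : t1.length ≤ m)
    (j : Nat) (hj : j < n) (ch : Char) (hch : ch = sl.getD j ' ')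
    (dp : List (List Int)) (hsh : pvShape n m dp)
    (hlow : ∀ j' k, j' ≤ j → pvA_get dp j' k = pvRows t1 t2 sl j' k)
    (hhigh : ∀ j' k, j < j' → pvA_get dp j' k = -1) :
    pvShape n m ((List.range t1.length).foldl (pvA_body t1 t2 j ch) dp) ∧
      (∀ j' k, j' ≤ j + 1 →
        pvA_get ((List.range t1.length).foldl (pvA_body t1 t2 j ch) dp) j' k =
          pvRows t1 t2 sl j' k) ∧
      (∀ j' k, j + 1 < j' →
        pvA_get ((List.range t1.length).foldl (pvA_body t1 t2 j ch) dp) j' k = -1) := by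
  have hge : ∀ k, -1 ≤ pvRows t1 t2 sl j k := fun k => pvRows_ge t1 t2 sl j k
  have hself_neg : pvSelf t2 ch (-1) = -1 := by unfold pvSelf; simp
  have key : ∀ c, c ≤ t1.length →
      pvShape n m ((List.range c).foldl (pvA_body t1 t2 j ch) dp) ∧
      (∀ j' k, j' ≤ j →
        pvA_get ((List.range c).foldl (pvA_body t1 t2 j ch) dp) j' k = pvRows t1 t2 sl j' k) ∧
      (∀ j' k, j + 1 < j' →
        pvA_get ((List.range c).foldl (pvA_body t1 t2 j ch) dp) j' k = -1) ∧
      (∀ k, k < c →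
        pvA_get ((List.range c).foldl (pvA_body t1 t2 j ch) dp) (j+1) k =
          pvStep t1 t2 ch (pvRows t1 t2 sl j) k) ∧
      (pvA_get ((List.range c).foldl (pvA_body t1 t2 j ch) dp) (j+1) c =
        pvT1m t1 ch (pvRows t1 t2 sl j) c) ∧
      (∀ k, c < k →
        pvA_get ((List.range c).foldl (pvA_body t1 t2 j ch) dp) (j+1) k = -1) := by
    intro c
    induction c with
    | zero =>
      intro _
      simp only [List.range_zero, List.foldl_nil]
      refine ⟨hsh, hlow, fun j' k h => hhigh j' k (by omega), fun k hk => absurd hk (by omega),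
        ?_, fun k _ => hhigh (j+1) k (by omega)⟩
      rw [hhigh (j+1) 0 (by omega)]
      unfold pvT1m
      rw [if_neg (by simp)]
    | succ c ih =>
      intro hc1
      have hclen : c < t1.length := by omega
      obtain ⟨Qsh, Qlow, Qhigh, Qmid, Qcur, Qtop⟩ := ih (by omega)
      set E := (List.range c).foldl (pvA_body t1 t2 j ch) dp with hE
      have hfold : (List.range (c+1)).foldl (pvA_body t1 t2 j ch) dp = pvA_body t1 t2 j ch E c := by
        rw [List.range_succ, List.foldl_append, List.foldl_cons, List.foldl_nil]
      rw [hfold]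
      have hEjc : pvA_get E j c = pvRows t1 t2 sl j c := Qlow j c le_rfl
      have hEc1 : pvA_get E (j+1) (c+1) = -1 := Qtop (c+1) (by omega)
      have hcm : c ≤ m := by omega
      have hc1m : c + 1 ≤ m := by omega
      have hjn : j + 1 ≤ n := by omega
      unfold pvA_body
      by_cases h0 : pvA_get E j c = -1
      · rw [if_pos h0]
        have hrc : pvRows t1 t2 sl j c = -1 := by rw [← hEjc]; exact h0
        refine ⟨Qsh, Qlow, Qhigh, ?_, ?_, fun k hk => Qtop k (by omega)⟩
        · intro k hk
          rcases Nat.lt_or_ge k c with h | h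
          · exact Qmid k h
          · have hkc : k = c := by omega
            subst hkc
            rw [Qcur]
            unfold pvStep
            rw [if_pos hclen, hrc, hself_neg]
            have htm := pvT1m_ge t1 ch (pvRows t1 t2 sl j) hge k
            omega
        · rw [hEc1]
          unfold pvT1m
          split_ifs with h
          · rw [Nat.add_sub_cancel, hrc]
          · rfl
      · rw [if_neg h0]
        have hrc0 : ¬ pvRows t1 t2 sl j c = -1 := by rw [← hEjc]; exact h0
        set rc := pvRows t1 t2 sl j c with hrcdef
        set tm := pvT1m t1 ch (pvRows t1 t2 sl j) c with htmdef
        have htmge : -1 ≤ tm := pvT1m_ge t1 ch (pvRows t1 t2 sl j) hge c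
        have hrcge : -1 ≤ rc := hge c
        set D1 := pvA_skip j c E with hD1
        have sh1 : pvShape n m D1 := pvA_skip_shape n m E j c Qsh
        have g1 := pvA_skip_get n m E j c Qsh hjn hcm
        set D2 := pvA_adv1 t1 j c ch D1 with hD2
        have sh2 : pvShape n m D2 := pvA_adv1_shape n m t1 D1 j c ch sh1
        have g2 := pvA_adv1_get n m t1 D1 j c ch sh1 hjn hc1m
        have f1c : pvA_get D1 (j+1) c = max tm rc := by
          rw [hD1, g1 (j+1) c, if_pos ⟨rfl, rfl⟩, Qcur, hEjc]
        have f1jc : pvA_get D1 j c = rc := by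
          rw [hD1, g1 j c, if_neg (by omega), hEjc]
        have f1c1 : pvA_get D1 (j+1) (c+1) = -1 := by
          rw [hD1, g1 (j+1) (c+1), if_neg (by omega), hEc1]
        have f2c1 : pvA_get D2 (j+1) (c+1) = pvT1m t1 ch (pvRows t1 t2 sl j) (c+1) := by
          rw [hD2, g2 (j+1) (c+1)]
          by_cases hchm : ch = t1.getD c ' '
          · rw [if_pos ⟨rfl, rfl, hchm⟩, f1c1, f1jc]
            unfold pvT1m
            rw [if_pos ⟨by omega, by simpa using hchm⟩, Nat.add_sub_cancel]
            omega
          · rw [if_neg (by tauto), f1c1]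
            unfold pvT1m
            rw [if_neg (by rw [Nat.add_sub_cancel]; tauto)]
        have f2c : pvA_get D2 (j+1) c = max tm rc := by
          rw [hD2, g2 (j+1) c, if_neg (by omega), f1c]
        have f2jc : pvA_get D2 j c = rc := by
          rw [hD2, g2 j c, if_neg (by omega), f1jc]
        have g3 := pvA_adv2_get n m t2 D2 j c ch sh2 hjn hcm
        simp only [f2jc] at g3
        have fpass : ∀ j' k', ¬ j' = j + 1 → pvA_get (pvA_adv2 t2 j c ch D2) j' k' = pvA_get E j' k' := by
          intro j' k' hne
          rw [g3 j' k', if_neg (by tauto), hD2, g2 j' k', if_neg (by tauto), hD1, g1 j' k',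
            if_neg (by tauto)]
        have fmid : ∀ k', ¬ k' = c → ¬ k' = c + 1 →
            pvA_get (pvA_adv2 t2 j c ch D2) (j+1) k' = pvA_get E (j+1) k' := by
          intro k' h1' h2'
          rw [g3 (j+1) k', if_neg (by tauto), hD2, g2 (j+1) k', if_neg (by tauto), hD1, g1 (j+1) k',
            if_neg (by tauto)]
        have f3c : pvA_get (pvA_adv2 t2 j c ch D2) (j+1) c = pvStep t1 t2 ch (pvRows t1 t2 sl j) c := by
          unfold pvStep
          rw [if_pos hclen]
          by_cases ht2 : rc < (t2.length : Int) ∧ ch = t2.getD rc.toNat ' '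
          · rw [g3 (j+1) c, if_pos ⟨rfl, rfl, ht2.1, ht2.2⟩, f2c]
            unfold pvSelf
            rw [← hrcdef, if_neg hrc0, if_pos ht2]
            omega
          · rw [g3 (j+1) c, if_neg (by tauto), f2c]
            unfold pvSelf
            rw [← hrcdef, if_neg hrc0, if_neg ht2]
        refine ⟨pvA_adv2_shape n m t2 D2 j c ch sh2, ?_, ?_, ?_, ?_, ?_⟩
        · intro j' k hj'
          rw [fpass j' k (by omega)]
          exact Qlow j' k hj'
        · intro j' k hj'
          rw [fpass j' k (by omega)]
          exact Qhigh j' k hj'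
        · intro k hk
          rcases Nat.lt_or_ge k c with h | h
          · rw [fmid k (by omega) (by omega)]
            exact Qmid k h
          · have hkc : k = c := by omega
            subst hkc
            exact f3c
        · rw [g3 (j+1) (c+1), if_neg (by omega)]
          exact f2c1
        · intro k hk
          rw [fmid k (by omega) (by omega)]
          exact Qtop k (by omega)
  obtain ⟨hsh', hlow', hhigh', hmid, hend, htop⟩ := key t1.length le_rfl
  refine ⟨hsh', ?_, hhigh'⟩
  intro j' k hj'
  rcases Nat.lt_or_ge j' (j+1) with h | h
  · exact hlow' j' k (by omega)
  · have e : j' = j + 1 := by omega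
    subst e
    have hrow : pvRows t1 t2 sl (j+1) k = pvStep t1 t2 ch (pvRows t1 t2 sl j) k := by
      show pvStep t1 t2 (sl.getD j ' ') (pvRows t1 t2 sl j) k = _
      rw [hch]
    rw [hrow]
    rcases Nat.lt_trichotomy k t1.length with hlt | heq | hgt
    · exact hmid k hlt
    · subst heq
      rw [hend]
      unfold pvStep
      rw [if_neg (by omega), if_pos rfl]
    · rw [htop k hgt]
      unfold pvStep
      rw [if_neg (by omega), if_neg (by omega)]

-- A's outer loop: the finished table is pvRows
theorem pvA_dp_eq (t1 t2 sl : List Char) (m : Nat)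
    (h1 : 0 < t1.length) (hm : t1.length ≤ m) (j k : Nat) (hj : j ≤ sl.length) :
    pvA_get (pvA_dp t1 t2 sl
      (pvA_set (List.replicate (sl.length + 1) (List.replicate (m + 1) (-1))) 0 0 0)) j k =
      pvRows t1 t2 sl j k := by
  have hrep : ∀ j' k', pvA_get (List.replicate (sl.length + 1) (List.replicate (m + 1) (-1 : Int))) j' k' = -1 := by
    intro j' k'
    simp only [pvA_get, List.getD_eq_getElem?_getD, List.getElem?_replicate]
    split_ifs <;> (simp [List.getElem?_replicate]; try split_ifs) <;> simp
  have hshrep : pvShape sl.length m (List.replicate (sl.length + 1) (List.replicate (m + 1) (-1 : Int))) := by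
    refine ⟨by simp, ?_⟩
    intro j' hj'
    simp only [List.getD_eq_getElem?_getD, List.getElem?_replicate]
    rw [if_pos (by omega)]
    simp
  have hsh0 : pvShape sl.length m
      (pvA_set (List.replicate (sl.length + 1) (List.replicate (m + 1) (-1))) 0 0 0) :=
    pvA_set_shape _ _ _ _ _ _ hshrep
  have hlow0 : ∀ j' k', j' ≤ 0 → pvA_get
      (pvA_set (List.replicate (sl.length + 1) (List.replicate (m + 1) (-1))) 0 0 0) j' k' =
      pvRows t1 t2 sl j' k' := by
    intro j' k' hj'
    have e : j' = 0 := by omega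
    subst e
    rw [pvA_get_set sl.length m _ 0 0 0 hshrep (by omega) (by omega)]
    show _ = pvRow0 k'
    unfold pvRow0
    by_cases hk0 : k' = 0
    · subst hk0; rw [if_pos ⟨rfl, rfl⟩, if_pos rfl]
    · rw [if_neg (by tauto), if_neg hk0, hrep]
  have hhigh0 : ∀ j' k', 0 < j' → pvA_get
      (pvA_set (List.replicate (sl.length + 1) (List.replicate (m + 1) (-1))) 0 0 0) j' k' = -1 := by
    intro j' k' hj'
    rw [pvA_get_set sl.length m _ 0 0 0 hshrep (by omega) (by omega), if_neg (by omega), hrep]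
  have main : ∀ (sl2 : List Char) (j0 : Nat) (dp : List (List Int)),
      sl.drop j0 = sl2 →
      pvShape sl.length m dp →
      (∀ j' k, j' ≤ j0 → pvA_get dp j' k = pvRows t1 t2 sl j' k) →
      (∀ j' k, j0 < j' → pvA_get dp j' k = -1) →
      ∀ j' k, j' ≤ sl.length →
        pvA_get ((sl2.foldl (fun st ch =>
            (st.1 + 1, (List.range t1.length).foldl (pvA_body t1 t2 st.1 ch) st.2))
          (j0, dp)).2) j' k = pvRows t1 t2 sl j' k := by
    intro sl2
    induction sl2 with
    | nil =>
      intro j0 dp hdrop hsh' hlow' hhigh' j' k hj'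
      simp only [List.foldl_nil]
      have hlen := congrArg List.length hdrop
      simp only [List.length_drop, List.length_nil] at hlen
      exact hlow' j' k (by omega)
    | cons ch rest ih =>
      intro j0 dp hdrop hsh' hlow' hhigh' j' k hj'
      obtain ⟨hch, hrest, hj0n⟩ := pv_drop_head sl j0 ch rest hdrop
      simp only [List.foldl_cons]
      obtain ⟨s1, s2, s3⟩ := pvA_row_eq t1 t2 sl sl.length m rfl h1 hm j0 hj0n ch hch.symm dp
        hsh' hlow' hhigh'
      exact ih (j0 + 1) _ hrest s1 s2 s3 j' k hj'
  unfold pvA_dp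
  exact main sl 0 _ (by simp) hsh0 hlow0 hhigh0 j k hj

theorem pvA_split_iff (sl tl : List Char) (i : Nat) (hi : i < tl.length) (hs : '#' ∉ sl) :
    pvA_split sl tl i = true ↔
      PvEmb (tl.take i) (tl.drop i) sl i (tl.length - i) sl.length := by
  have ht1 : (tl.take i).length = i := by simp; omega
  have ht2 : (tl.drop i).length = tl.length - i := by simp
  have h1 : 0 < (tl.take i ++ ['#']).length := by simp
  have hm : (tl.take i ++ ['#']).length ≤ tl.length := by simp; omega
  have hA : ∀ k, pvA_get (pvA_dp (tl.take i ++ ['#']) (tl.drop i ++ ['#']) sl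
      (pvA_set (List.replicate (sl.length + 1) (List.replicate (tl.length + 1) (-1))) 0 0 0))
      sl.length k =
      pvRows (tl.take i ++ ['#']) (tl.drop i ++ ['#']) sl sl.length k :=
    fun k => pvA_dp_eq _ _ _ _ h1 hm _ k le_rfl
  unfold pvA_split
  simp only [hA, List.any_eq_true, List.mem_range, decide_eq_true_eq]
  constructor
  · rintro ⟨k, hk, hle⟩
    have hge := pvRows_ge (tl.take i ++ ['#']) (tl.drop i ++ ['#']) sl sl.length k
    have h0 : 0 ≤ pvRows (tl.take i ++ ['#']) (tl.drop i ++ ['#']) sl sl.length k := by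
      rcases eq_or_lt_of_le hge with heq | hlt
      · exfalso
        rw [← heq] at hle
        omega
      · omega
    have hemb := pvRows_sound (tl.take i ++ ['#']) (tl.drop i ++ ['#']) sl sl.length le_rfl k h0
    rw [pvEmb_bridge (tl.take i) (tl.drop i) sl hs] at hemb
    obtain ⟨hka, hkb⟩ := pvEmb_bounds _ _ _ _ _ _ hemb
    rw [ht1] at hka
    rw [ht2] at hkb
    have hki : k = i ∧ (pvRows (tl.take i ++ ['#']) (tl.drop i ++ ['#']) sl sl.length k).toNat
        = tl.length - i := by omega
    rw [hki.2, hki.1] at hemb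
    exact hemb
  · intro hemb
    rw [← pvEmb_bridge (tl.take i) (tl.drop i) sl hs] at hemb
    have hcomp := pvRows_complete (tl.take i ++ ['#']) (tl.drop i ++ ['#']) sl i
      (tl.length - i) sl.length hemb (by simp; omega)
    refine ⟨i, by omega, ?_⟩
    omega

theorem pv_split_eq (sl tl : List Char) (i : Nat) (hi : i < tl.length) (hs : '#' ∉ sl) :
    pvA_split sl tl i = pvSplitB sl tl i := by
  rw [Bool.eq_iff_iff, pvA_split_iff sl tl i hi hs, pvSplitB_iff sl tl i hi]

theorem pv_any_congr (l : List Nat) (f g : Nat → Bool) (h : ∀ i ∈ l, f i = g i) :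
    l.any f = l.any g := by
  induction l with
  | nil => rfl
  | cons x xs ih =>
    simp only [List.any_cons, h x (by simp)]
    rw [ih (fun i hi => h i (by simp [hi]))]

theorem pvB_iloop_eq (sl tl : List Char) (l : List Nat) :
    pvB_iloop sl tl l = if l.any (fun i => pvSplitB sl tl i) then "YES" else "NO" := by
  induction l with
  | nil => rfl
  | cons x xs ih =>
    show (if pvSplitB sl tl x then "YES" else pvB_iloop sl tl xs) = _
    by_cases h : pvSplitB sl tl x <;> simp [h, ih, List.any_cons]

-- ===== VERDICT (by name: the statement is the Claim_ definition above) =====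
theorem solve_single_case_spec : Claim_equal_solve_single_case := by
  unfold Claim_equal_solve_single_case
  intro s t _ hpre
  unfold Spec_solve_single_case solve_single_case solve_single_case_alt
  rw [pvB_iloop_eq]
  have h : (List.range t.toList.length).any (fun i => pvA_split s.toList t.toList i)
         = (List.range t.toList.length).any (fun i => pvSplitB s.toList t.toList i) :=
    pv_any_congr _ _ _ (fun i hi => pv_split_eq _ _ _ (List.mem_range.mp hi) hpre)
  rw [h]
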